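-- pv_equiv track=rewrite | github.com/AI-Hypercomputer/xpk | tools/recipes.py | extract_script_outputs
-- ===== SOURCE A (Python) =====
-- def extract_script_outputs(output: str) -> tuple[list[str], bool]:
--   results = []
--   current_pos = 0
--
--   start_marker = "XPK_RECIPE_EXECUTOR_BLOCK_START"
--   end_marker = "XPK_RECIPE_EXECUTOR_BLOCK_END"
--
--   while True:
--     start_idx = output.find(start_marker, current_pos)
--
--     if start_idx == -1:
--       break
--
--     content_start = start_idx + len(start_marker)
--     end_idx = output.find(end_marker, content_start)
--
--     if end_idx == -1:
--       content = output[content_start:].strip()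
--       results.append(content)
--       return results, True
--
--     content = output[content_start:end_idx].strip()
--     results.append(content)
--     current_pos = end_idx + len(end_marker)
--
--   return results, False
-- ===== SOURCE B (Python) =====
-- def extract_script_outputs(output: str) -> tuple[list[str], bool]:
--   start_marker = "XPK_RECIPE_EXECUTOR_BLOCK_START"
--   end_marker = "XPK_RECIPE_EXECUTOR_BLOCK_END"
--
--   # index the string once: sorted lists of all occurrence positions of each marker
--   starts = [i for i in range(len(output)) if output.startswith(start_marker, i)]
--   ends = [i for i in range(len(output)) if output.startswith(end_marker, i)]
--
--   results = []
--   cur = 0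
--   while True:
--     while starts and starts[0] < cur:
--       starts = starts[1:]
--     if not starts:
--       return results, False
--     c = starts[0] + len(start_marker)
--     while ends and ends[0] < c:
--       ends = ends[1:]
--     if not ends:
--       results.append(output[c:].strip())
--       return results, True
--     e = ends[0]
--     results.append(output[c:e].strip())
--     cur = e + len(end_marker)
-- ===== Notes on version B (the rewrite author's own statement) =====
-- stated objective: alternative
-- what changed: A scans incrementally with a cursor and paired str.find calls; B first indexes the string once into two sorted lists of all occurrence positions of the start and end markers, then pairs blocks by a two-pointer merge walk over those position lists, slicing content between the chosen positions.
import Mathlib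
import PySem

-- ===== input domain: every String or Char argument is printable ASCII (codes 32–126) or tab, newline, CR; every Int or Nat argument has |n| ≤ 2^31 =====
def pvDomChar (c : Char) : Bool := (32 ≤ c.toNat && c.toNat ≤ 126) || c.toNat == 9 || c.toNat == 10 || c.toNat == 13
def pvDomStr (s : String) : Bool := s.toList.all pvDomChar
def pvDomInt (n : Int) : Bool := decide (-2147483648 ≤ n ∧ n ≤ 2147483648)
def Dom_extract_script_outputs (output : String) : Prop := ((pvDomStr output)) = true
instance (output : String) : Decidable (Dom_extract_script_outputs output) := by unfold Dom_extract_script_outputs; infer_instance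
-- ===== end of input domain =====

-- B replaces A's incremental cursor-and-find scan by a staged algorithm: index the string once
-- into the two sorted lists of all marker occurrence positions, then pair blocks by a
-- two-pointer merge walk over those lists; same return value (objective: alternative).

-- the two marker string constants of the Python source (start_marker has 31 chars, end_marker 29)
def pvStartM : List Char := "XPK_RECIPE_EXECUTOR_BLOCK_START".toList
def pvEndM : List Char := "XPK_RECIPE_EXECUTOR_BLOCK_END".toList

-- s.find(sub, k) ≠ -1 means the hit is at an index ≥ k with sub lying inside s (used only for termination)
lemma pvFindFrom_bound (s sub : List Char) (hs : sub ≠ []) (k : Nat) (hk : k ≤ s.length)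
    (h : PySem.Chars.findFrom s sub (k : Int) ≠ -1) :
    (k : Int) ≤ PySem.Chars.findFrom s sub (k : Int) ∧
      (PySem.Chars.findFrom s sub (k : Int)).toNat + sub.length ≤ s.length := by
  obtain ⟨h1, h2, -⟩ := PySem.Chars.findFrom_natCast_spec s sub k hk h
  have hl := h2.length_le
  rw [List.length_drop] at hl
  have hp : 0 < sub.length := List.length_pos_iff.mpr hs
  exact ⟨h1, by omega⟩

-- ===== PORT A =====
-- A's while-loop: state is (results, current_pos); current_pos only ever moves right past a
-- found end marker, so it stays a Nat and ≤ output.length (the proof argument `hpos` carries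
-- that invariant for termination only; it does not affect the computed value).
-- `start_idx + len(start_marker)` / `end_idx + len(end_marker)` are `.toNat + 31` / `.toNat + 29`:
-- exact because both branches have already returned when the find result is -1.
def pvALoop (s : List Char) (results : List String) (pos : Nat) (hpos : pos ≤ s.length) :
    List String × Bool :=
  let start_idx := PySem.Chars.findFrom s pvStartM (pos : Int)
  if h1 : start_idx = -1 then (results, false)
  else
    let content_start := start_idx.toNat + 31
    let end_idx := PySem.Chars.findFrom s pvEndM (content_start : Int)
    if h2 : end_idx = -1 then
      (results ++ [String.ofList (PySem.Chars.strip (PySem.List.slice s (some (content_start : Int)) none))], true)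
    else
      pvALoop s
        (results ++ [String.ofList (PySem.Chars.strip (PySem.List.slice s (some (content_start : Int)) (some end_idx)))])
        (end_idx.toNat + 29)
        (by
          have hb1 := pvFindFrom_bound s pvStartM (by decide) pos hpos h1
          have hL : pvStartM.length = 31 := rfl
          have hb2 := pvFindFrom_bound s pvEndM (by decide) content_start
            (by have hc : content_start = start_idx.toNat + 31 := rfl; omega) h2
          have hL2 : pvEndM.length = 29 := rfl
          omega)
  termination_by s.length - pos
  decreasing_by
    simp only [start_idx, content_start, end_idx] at h1 h2 ⊢
    have hb1 := pvFindFrom_bound s pvStartM (by decide) pos hpos h1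
    have hL : pvStartM.length = 31 := rfl
    have hb2 := pvFindFrom_bound s pvEndM (by decide)
      ((PySem.Chars.findFrom s pvStartM (pos : Int)).toNat + 31) (by omega) h2
    have hL2 : pvEndM.length = 29 := rfl
    omega

def extract_script_outputs (output : String) : List String × Bool :=
  pvALoop output.toList [] 0 (by simp)

-- ===== PORT B =====
-- `[i for i in range(len(output)) if output.startswith(marker, i)]`: the sorted list of all
-- occurrence positions of the marker (Python's startswith with a start offset = startswith on
-- the suffix, exact for 0 ≤ i ≤ len).
def pvOcc (s sub : List Char) : List Nat :=
  (List.range s.length).filter (fun i => PySem.Chars.startswith (List.drop i s) sub)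

-- B's while-loop: state is (results, starts, ends, cur); each inner
-- `while xs and xs[0] < bound: xs = xs[1:]` loop is a dropWhile on the position list.
def pvBLoop (s : List Char) (results : List String) (starts ends : List Nat) (cur : Nat) :
    List String × Bool :=
  match hs : starts.dropWhile (fun i => decide (i < cur)) with
  | [] => (results, false)
  | st :: starts' =>
    match he : ends.dropWhile (fun i => decide (i < st + 31)) with
    | [] =>
      (results ++ [String.ofList (PySem.Chars.strip (PySem.List.slice s (some ((st + 31 : Nat) : Int)) none))], true)
    | e :: ends' =>
      pvBLoop s
        (results ++ [String.ofList (PySem.Chars.strip (PySem.List.slice s (some ((st + 31 : Nat) : Int)) (some ((e : Nat) : Int))))])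
        (st :: starts') (e :: ends') (e + 29)
  termination_by (starts.dropWhile (fun i => decide (i < cur))).length
  decreasing_by
    have hne : ends.dropWhile (fun i => decide (i < st + 31)) ≠ [] := by rw [he]; simp
    have hhd := List.head_dropWhile_not (fun i => decide (i < st + 31)) hne
    simp only [he, List.head_cons, decide_eq_false_iff_not, not_lt] at hhd
    rw [hs, List.dropWhile_cons_of_pos (by simp; omega)]
    have := List.length_dropWhile_le (fun i => decide (i < e + 29)) starts'
    simp
    omega

def extract_script_outputs_alt (output : String) : List String × Bool :=
  pvBLoop output.toList [] (pvOcc output.toList pvStartM) (pvOcc output.toList pvEndM) 0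

-- ===== PRECONDITION & SPEC =====
def Spec_extract_script_outputs (output : String) (out : List String × Bool) : Prop := out = extract_script_outputs_alt output
instance (output : String) (out : List String × Bool) : Decidable (Spec_extract_script_outputs output out) := by unfold Spec_extract_script_outputs; infer_instance

-- ===== CLAIM (what is proved, stated in full; the proofs are below) =====
def Claim_equal_extract_script_outputs : Prop := ∀ (output : String), Dom_extract_script_outputs output → Spec_extract_script_outputs output (extract_script_outputs output)

-- ===== LEMMAS AND PROOFS =====

-- membership in the occurrence list
lemma pvOcc_mem {s sub : List Char} {i : Nat} (h : i ∈ pvOcc s sub) :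
    i < s.length ∧ sub <+: s.drop i := by
  unfold pvOcc at h
  rw [List.mem_filter, List.mem_range] at h
  exact ⟨h.1, (PySem.Chars.startswith_iff _ _).mp h.2⟩

lemma pvOcc_mem_of {s sub : List Char} {i : Nat} (hsub : sub ≠ []) (h1 : sub <+: s.drop i) :
    i ∈ pvOcc s sub := by
  have hl := h1.length_le
  rw [List.length_drop] at hl
  have hp : 0 < sub.length := List.length_pos_iff.mpr hsub
  unfold pvOcc
  rw [List.mem_filter, List.mem_range]
  exact ⟨by omega, (PySem.Chars.startswith_iff _ _).mpr h1⟩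

lemma pvOcc_pairwise (s sub : List Char) : (pvOcc s sub).Pairwise (· < ·) :=
  List.Pairwise.filter _ List.pairwise_lt_range

-- THE BRIDGE: the first occurrence position ≥ k is exactly s.find(sub, k)
lemma pvOcc_head (s sub : List Char) (hsub : sub ≠ []) (k : Nat) (hk : k ≤ s.length) :
    ((pvOcc s sub).dropWhile (fun i => decide (i < k))).head? =
      if PySem.Chars.findFrom s sub (k : Int) = -1 then none
      else some (PySem.Chars.findFrom s sub (k : Int)).toNat := by
  split_ifs with h
  · rw [List.head?_eq_none_iff, List.dropWhile_eq_nil_iff]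
    intro x hx
    obtain ⟨-, hpre⟩ := pvOcc_mem hx
    simp only [decide_eq_true_eq]
    by_contra hxk
    rw [not_lt] at hxk
    have hinf : sub <+: (s.drop k).drop (x - k) := by
      rw [List.drop_drop, show k + (x - k) = x from by omega]; exact hpre
    exact ((PySem.Chars.findFrom_natCast_eq_neg_one_iff s sub k hk).mp h)
      (hinf.isInfix.trans (List.drop_suffix _ _).isInfix)
  · obtain ⟨h1, h2, h3⟩ := PySem.Chars.findFrom_natCast_spec s sub k hk h
    set r := (PySem.Chars.findFrom s sub (k : Int)).toNat with hr
    have hkr : k ≤ r := by omega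
    have hrmem : r ∈ pvOcc s sub := pvOcc_mem_of hsub h2
    have hrdrop : r ∈ (pvOcc s sub).dropWhile (fun i => decide (i < k)) := by
      rcases (List.mem_append.mp (by
        rw [List.takeWhile_append_dropWhile (p := fun i => decide (i < k))]; exact hrmem)) with htk | hdw
      · have := List.mem_takeWhile_imp htk
        simp at this; omega
      · exact hdw
    have hne : (pvOcc s sub).dropWhile (fun i => decide (i < k)) ≠ [] := by
      intro hnil; rw [hnil] at hrdrop; simp at hrdrop
    obtain ⟨hd, tl, hdw⟩ := List.exists_cons_of_ne_nil hne
    rw [hdw, List.head?_cons]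
    -- hd is an occurrence position ≥ k, so r ≤ hd by minimality of find
    have hdmem : hd ∈ pvOcc s sub :=
      (List.dropWhile_sublist _).subset (by rw [hdw]; exact List.mem_cons_self)
    have hdk : ¬ hd < k := by
      have := List.head_dropWhile_not (fun i => decide (i < k)) hne
      simp only [hdw, List.head_cons, decide_eq_false_iff_not] at this
      exact this
    have hrle : r ≤ hd := by
      by_contra hlt
      rw [not_le] at hlt
      exact h3 hd (by omega) (by omega) (pvOcc_mem hdmem).2
    have hdle : hd ≤ r := by
      rw [hdw] at hrdrop
      rcases List.mem_cons.mp hrdrop with hEq | htl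
      · omega
      · have hp : (hd :: tl).Pairwise (· < ·) := by
          rw [← hdw]; exact (pvOcc_pairwise s sub).sublist (List.dropWhile_sublist _)
        have := (List.pairwise_cons.mp hp).1 r htl
        omega
    congr 1; omega

-- dropping below a smaller bound first does not change a dropWhile below a larger bound
lemma pvDrop_drop (l : List Nat) (a b : Nat) (hab : a ≤ b) :
    (l.dropWhile (fun i => decide (i < a))).dropWhile (fun i => decide (i < b))
      = l.dropWhile (fun i => decide (i < b)) := by
  induction l with
  | nil => simp
  | cons x xs ih =>
    by_cases hx : x < a
    · rw [List.dropWhile_cons_of_pos (by simpa), ih,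
        List.dropWhile_cons_of_pos (by simp; omega)]
    · rw [List.dropWhile_cons_of_neg (by simp; omega)]

-- the main loop correspondence
lemma pvMain (s : List Char) (results : List String) (pos : Nat) (hpos : pos ≤ s.length) :
    ∀ starts ends : List Nat,
      starts.dropWhile (fun i => decide (i < pos)) = (pvOcc s pvStartM).dropWhile (fun i => decide (i < pos)) →
      ends.dropWhile (fun i => decide (i < pos)) = (pvOcc s pvEndM).dropWhile (fun i => decide (i < pos)) →
      pvALoop s results pos hpos = pvBLoop s results starts ends pos := by
  fun_induction pvALoop with
  | case1 results pos hpos start_idx h1 =>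
    intro starts ends hs he
    have hb := pvOcc_head s pvStartM (by decide) pos hpos
    rw [if_pos h1] at hb
    have hB : starts.dropWhile (fun i => decide (i < pos)) = [] := by
      rw [hs]; exact List.head?_eq_none_iff.mp hb
    rw [pvBLoop.eq_def]
    split
    · rfl
    · rename_i st starts' heq
      rw [hB] at heq; exact absurd heq (by simp)
  | case2 results pos hpos start_idx h1 content_start end_idx h2 =>
    intro starts ends hs he
    have hb := pvOcc_head s pvStartM (by decide) pos hpos
    rw [if_neg h1] at hb
    have hbound := pvFindFrom_bound s pvStartM (by decide) pos hpos h1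
    rw [pvBLoop.eq_def]
    split
    · rename_i heq
      rw [← hs, heq] at hb
      exact absurd hb (by simp)
    · rename_i st starts' heq
      have hst : st = start_idx.toNat := by
        rw [← hs, heq, List.head?_cons] at hb
        exact (Option.some_inj.mp hb)
      have hpos_st : pos ≤ st := by
        have hL : pvStartM.length = 31 := rfl
        omega
      have hEchain : ends.dropWhile (fun i => decide (i < st + 31))
          = (pvOcc s pvEndM).dropWhile (fun i => decide (i < st + 31)) := by
        rw [← pvDrop_drop ends pos (st + 31) (by omega), he,
          pvDrop_drop _ pos (st + 31) (by omega)]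
      have hstlen : st + 31 ≤ s.length := by
        have hL : pvStartM.length = 31 := rfl
        omega
      have hbE := pvOcc_head s pvEndM (by decide) (st + 31) hstlen
      have h2' : PySem.Chars.findFrom s pvEndM ((st + 31 : Nat) : Int) = -1 := by
        rw [hst]; exact h2
      rw [if_pos h2'] at hbE
      split
      · rename_i heq2
        simp only [hst]
        rfl
      · rename_i e ends' heq2
        rw [hEchain, List.head?_eq_none_iff.mp hbE] at heq2
        exact absurd heq2 (by simp)
  | case3 results pos hpos start_idx h1 content_start end_idx h2 ih =>
    intro starts ends hs he
    have hb := pvOcc_head s pvStartM (by decide) pos hpos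
    rw [if_neg h1] at hb
    have hbound := pvFindFrom_bound s pvStartM (by decide) pos hpos h1
    rw [pvBLoop.eq_def]
    split
    · rename_i heq
      rw [← hs, heq] at hb
      exact absurd hb (by simp)
    · rename_i st starts' heq
      have hst : st = start_idx.toNat := by
        rw [← hs, heq, List.head?_cons] at hb
        exact (Option.some_inj.mp hb)
      have hpos_st : pos ≤ st := by
        have hL : pvStartM.length = 31 := rfl
        omega
      have hEchain : ends.dropWhile (fun i => decide (i < st + 31))
          = (pvOcc s pvEndM).dropWhile (fun i => decide (i < st + 31)) := by
        rw [← pvDrop_drop ends pos (st + 31) (by omega), he,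
          pvDrop_drop _ pos (st + 31) (by omega)]
      have hstlen : st + 31 ≤ s.length := by
        have hL : pvStartM.length = 31 := rfl
        omega
      have hbE := pvOcc_head s pvEndM (by decide) (st + 31) hstlen
      have h2' : ¬ PySem.Chars.findFrom s pvEndM ((st + 31 : Nat) : Int) = -1 := by
        rw [hst]; exact h2
      rw [if_neg h2'] at hbE
      have hbound2 := pvFindFrom_bound s pvEndM (by decide) (st + 31) hstlen h2'
      split
      · rename_i heq2
        rw [← hEchain, heq2] at hbE
        exact absurd hbE (by simp)
      · rename_i e ends' heq2
        have hE : e = (PySem.Chars.findFrom s pvEndM ((st + 31 : Nat) : Int)).toNat := by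
          rw [← hEchain, heq2, List.head?_cons] at hbE
          exact Option.some_inj.mp hbE
        have hEidx2 : end_idx = PySem.Chars.findFrom s pvEndM ((st + 31 : Nat) : Int) := by
          simp only [end_idx, content_start]
          congr 2
          omega
        have hEidx : e = end_idx.toNat := by rw [hE, hEidx2]
        have hste : st + 31 ≤ e := by
          have hL : pvEndM.length = 29 := rfl
          omega
        have hcast : end_idx = ((e : Nat) : Int) := by
          rw [hEidx2, hE]
          have := hbound2.1
          omega
        have hcs31 : ((st + 31 : Nat) : Int) = (content_start : Int) := by
          simp only [content_start]
          omega
        have inv1 : (st :: starts').dropWhile (fun i => decide (i < e + 29))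
            = (pvOcc s pvStartM).dropWhile (fun i => decide (i < e + 29)) := by
          rw [← heq, hs, pvDrop_drop _ pos (e + 29) (by omega)]
        have inv2 : (e :: ends').dropWhile (fun i => decide (i < e + 29))
            = (pvOcc s pvEndM).dropWhile (fun i => decide (i < e + 29)) := by
          rw [← heq2, hEchain, pvDrop_drop _ (st + 31) (e + 29) (by omega)]
        conv_rhs => rw [hcs31, show ((e : Nat) : Int) = end_idx from hcast.symm,
          show e + 29 = end_idx.toNat + 29 from by omega]
        exact ih (st :: starts') (e :: ends')
          (by rw [show end_idx.toNat + 29 = e + 29 from by omega]; exact inv1)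
          (by rw [show end_idx.toNat + 29 = e + 29 from by omega]; exact inv2)

-- ===== VERDICT (by name: the statement is the Claim_ definition above) =====
theorem extract_script_outputs_spec : Claim_equal_extract_script_outputs := by
  intro output _
  unfold Spec_extract_script_outputs extract_script_outputs extract_script_outputs_alt
  apply pvMain output.toList [] 0 (by simp) _ _ <;> simp
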